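-- pv_equiv track=rewrite | github.com/sga-encoder/404_Luck_Not_Found_Servidor | src/model/salaDeJuego/juego/KnuckleBones.py | sumar_puntos
-- ===== SOURCE A (Python) =====
-- def sumar_puntos(mesa_del_jugador: list) -> int:
--     puntos = 0
--     for i in range(3):
--         sum_aux = 0
--         contador = 0
--         for j in range(3):
--             if(mesa_del_jugador[i][j] == mesa_del_jugador[i][0] and j != 0) or (mesa_del_jugador[i][j] == mesa_del_jugador[i][1] and j != 1) or (mesa_del_jugador[i][j] == mesa_del_jugador[i][2] and j != 2):
--                 sum_aux += mesa_del_jugador[i][j]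
--                 contador += 1
--                 if(j == 2):
--                     puntos += sum_aux * contador
--             else:
--                 if contador > 1:
--                     puntos += sum_aux * contador
--                     sum_aux = 0
--                     contador = 0
--                 puntos += mesa_del_jugador[i][j]
--
--     return puntos
-- ===== SOURCE B (Python) =====
-- def sumar_puntos(mesa_del_jugador: list) -> int:
--     # Frequency-table scoring: each row contributes sum of v * count(v)^2
--     # over the first three cells, replacing A's accumulate/flush pass.
--     total = 0
--     for i in range(3):
--         row = mesa_del_jugador[i]
--         cells = [row[0], row[1], row[2]]
--         counts = {}
--         for v in cells:
--             counts[v] = counts.get(v, 0) + 1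
--         for v, c in counts.items():
--             total += v * c * c
--     return total
-- ===== Notes on version B (the rewrite author's own statement) =====
-- stated objective: simpler
-- what changed: Replaces A's stateful left-to-right accumulate/flush duplicate-tracking pass (with its triple-disjunction duplicate test and leftover-state flushes) by building a frequency table of the row's three cells and adding v*count(v)^2 per distinct value.
import Mathlib
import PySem

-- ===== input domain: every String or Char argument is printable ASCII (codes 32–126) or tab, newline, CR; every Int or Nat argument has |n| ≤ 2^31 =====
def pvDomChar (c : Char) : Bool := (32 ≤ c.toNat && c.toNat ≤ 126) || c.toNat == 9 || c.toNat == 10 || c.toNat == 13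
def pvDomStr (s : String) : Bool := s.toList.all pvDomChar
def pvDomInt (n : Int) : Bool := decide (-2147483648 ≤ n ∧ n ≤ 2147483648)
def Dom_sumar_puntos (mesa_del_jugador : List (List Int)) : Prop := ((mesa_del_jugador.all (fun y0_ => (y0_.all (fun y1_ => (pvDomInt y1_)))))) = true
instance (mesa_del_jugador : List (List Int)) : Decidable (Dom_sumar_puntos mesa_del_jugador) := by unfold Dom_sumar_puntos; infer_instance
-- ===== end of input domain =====

-- B replaces A's accumulate/flush duplicate-tracking pass by a per-row frequency
-- table scoring v*count(v)^2 per distinct value (objective: simpler).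


-- ===== PORT A =====
-- mesa_del_jugador[i][j]; pyGetD's default is only reached outside Pre_ (Python raises IndexError there)
def pvCell (m : List (List Int)) (i j : Int) : Int :=
  PySem.List.pyGetD (PySem.List.pyGetD m i []) j 0

-- body of A's outer 'for i in range(3)' loop: the inner flush pass over j
def pvRowPassA (m : List (List Int)) (puntos i : Int) : Int :=
  ((PySem.List.pyRange 0 3 1).foldl (fun (st : Int × Int × Int) j =>
      let p := st.1
      let s := st.2.1
      let c := st.2.2
      if (pvCell m i j = pvCell m i 0 ∧ j ≠ 0) ∨
         (pvCell m i j = pvCell m i 1 ∧ j ≠ 1) ∨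
         (pvCell m i j = pvCell m i 2 ∧ j ≠ 2) then
        let s := s + pvCell m i j
        let c := c + 1
        (if j = 2 then p + s * c else p, s, c)
      else
        if c > 1 then (p + s * c + pvCell m i j, 0, 0)
        else (p + pvCell m i j, s, c)) (puntos, 0, 0)).1

def sumar_puntos (mesa_del_jugador : List (List Int)) : Int :=
  (PySem.List.pyRange 0 3 1).foldl (pvRowPassA mesa_del_jugador) 0

-- ===== PORT B =====
-- body of B's 'for i in range(3)' loop: frequency table of the row's 3 cells, add v*c*c
def pvRowScoreB (m : List (List Int)) (total i : Int) : Int :=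
  let row := PySem.List.pyGetD m i []
  let cells := [PySem.List.pyGetD row 0 0, PySem.List.pyGetD row 1 0, PySem.List.pyGetD row 2 0]
  let counts := cells.foldl (fun d v => d.insert v (d.getD v 0 + 1)) PySem.Dict.empty
  counts.items.foldl (fun t p => t + p.1 * p.2 * p.2) total

def sumar_puntos_alt (mesa_del_jugador : List (List Int)) : Int :=
  (PySem.List.pyRange 0 3 1).foldl (pvRowScoreB mesa_del_jugador) 0

-- ===== PRECONDITION & SPEC =====
-- A (and B) read mesa[i][j] for i,j < 3: inputs with fewer than 3 rows, or a
-- short row among the first three, raise IndexError in both and are excluded.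
def Pre_sumar_puntos (mesa_del_jugador : List (List Int)) : Prop :=
  3 ≤ mesa_del_jugador.length ∧ ∀ r ∈ mesa_del_jugador.take 3, 3 ≤ r.length
instance (mesa_del_jugador : List (List Int)) : Decidable (Pre_sumar_puntos mesa_del_jugador) := by unfold Pre_sumar_puntos; infer_instance

def pvWitness_sumar_puntos : List (List Int) := [[1, 1, 2], [3, 3, 3], [4, 5, 6]]

def Spec_sumar_puntos (mesa_del_jugador : List (List Int)) (out : Int) : Prop := out = sumar_puntos_alt mesa_del_jugador
instance (mesa_del_jugador : List (List Int)) (out : Int) : Decidable (Spec_sumar_puntos mesa_del_jugador out) := by unfold Spec_sumar_puntos; infer_instance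

-- ===== CLAIM (what is proved, stated in full; the proofs are below) =====
def Claim_equal_sumar_puntos : Prop := ∀ (mesa_del_jugador : List (List Int)), Dom_sumar_puntos mesa_del_jugador → Pre_sumar_puntos mesa_del_jugador → Spec_sumar_puntos mesa_del_jugador (sumar_puntos mesa_del_jugador)

-- ===== LEMMAS AND PROOFS =====

-- on a row with at least 3 cells, A's flush pass and B's frequency score agree
lemma pv_row_eq (m : List (List Int)) (i p a b c : Int) (t : List Int)
    (h : PySem.List.pyGetD m i [] = a :: b :: c :: t) :
    pvRowPassA m p i = pvRowScoreB m p i := by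
  have hr : PySem.List.pyRange 0 3 1 = [0, 1, 2] := by decide
  simp only [pvRowPassA, pvRowScoreB, pvCell, hr, List.foldl, h]
  simp [PySem.List.pyGetD_ofNat', PySem.Dict.insert, PySem.Dict.empty, PySem.Dict.getD,
        PySem.Dict.get?]
  by_cases h1 : a = b <;> by_cases h2 : a = c <;> by_cases h3 : b = c <;>
    simp_all <;> (try (split_ifs <;> simp_all)) <;> ring

-- ===== VERDICT (by name: the statement is the Claim_ definition above) =====

theorem sumar_puntos_spec : Claim_equal_sumar_puntos := by
  intro m _ hpre
  obtain ⟨hlen, hrows⟩ := hpre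
  match m, hlen with
  | r0 :: r1 :: r2 :: rest, _ =>
    obtain ⟨a0, b0, c0, t0, h0⟩ : ∃ a b c t, r0 = a :: b :: c :: t := by
      have := hrows r0 (by simp); match r0, this with
      | a :: b :: c :: t, _ => exact ⟨a, b, c, t, rfl⟩
    obtain ⟨a1, b1, c1, t1, h1⟩ : ∃ a b c t, r1 = a :: b :: c :: t := by
      have := hrows r1 (by simp); match r1, this with
      | a :: b :: c :: t, _ => exact ⟨a, b, c, t, rfl⟩
    obtain ⟨a2, b2, c2, t2, h2⟩ : ∃ a b c t, r2 = a :: b :: c :: t := by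
      have := hrows r2 (by simp); match r2, this with
      | a :: b :: c :: t, _ => exact ⟨a, b, c, t, rfl⟩
    show sumar_puntos _ = sumar_puntos_alt _
    have hr : PySem.List.pyRange 0 3 1 = [0, 1, 2] := by decide
    simp only [sumar_puntos, sumar_puntos_alt, hr, List.foldl]
    rw [pv_row_eq _ 0 _ a0 b0 c0 t0 (by simp [h0, PySem.List.pyGetD_ofNat'])]
    rw [pv_row_eq _ 1 _ a1 b1 c1 t1 (by simp [h1, PySem.List.pyGetD_ofNat'])]
    rw [pv_row_eq _ 2 _ a2 b2 c2 t2 (by simp [h2, PySem.List.pyGetD_ofNat'])]
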